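-- pv_equiv track=rewrite | github.com/jacobv1234/Pokemon-Gen1-Images-Viewer | graphic viewer.py | minimalist_smooth
-- ===== SOURCE A (Python) =====
-- def minimalist_smooth(s):
--     newtile = []
--     for x in range(9): newtile.append(s[4])
--     pixcolour = s[4]
--
--     for x in range(4):
--         t = str(x+1)
--         if s[1] == t:
--             if int(t) > int(pixcolour):
--                 newtile[0] = t
--                 newtile[1] = t
--                 newtile[2] = t
--         if s[3] == t:
--             if int(t) > int(pixcolour):
--                 newtile[0] = t
--                 newtile[3] = t
--                 newtile[6] = t
--         if s[7] == t:
--             if int(t) > int(pixcolour):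
--                 newtile[6] = t
--                 newtile[7] = t
--                 newtile[8] = t
--         if s[5] == t:
--             if int(t) > int(pixcolour):
--                 newtile[2] = t
--                 newtile[5] = t
--                 newtile[8] = t
--
--     data = ""
--     for x in range(9): data += newtile[x]
--
--     return data
-- ===== SOURCE B (Python) =====
-- def minimalist_smooth(s):
--     center = s[4]
--     top, left, right, bottom = s[1], s[3], s[5], s[7]
--     cells = [(top, left), (top,), (top, right),
--              (left,), (), (right,),
--              (left, bottom), (bottom,), (bottom, right)]
--
--     def qualifies(n):
--         return n in ('1', '2', '3', '4') and int(n) > int(center)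
--
--     out = []
--     for nbrs in cells:
--         winners = [int(n) for n in nbrs if qualifies(n)]
--         out.append(str(max(winners)) if winners else center)
--     return ''.join(out)
-- ===== Notes on version B (the rewrite author's own statement) =====
-- stated objective: alternative
-- what changed: A mutates a 9-cell tile in a loop over digits 1..4 with four conditional triple-writes per digit; B computes each of the 9 cells independently from a per-cell list of contributing edge neighbors, taking the maximum qualifying digit (a digit '1'..'4' exceeding the center) or the center.
import Mathlib
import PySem

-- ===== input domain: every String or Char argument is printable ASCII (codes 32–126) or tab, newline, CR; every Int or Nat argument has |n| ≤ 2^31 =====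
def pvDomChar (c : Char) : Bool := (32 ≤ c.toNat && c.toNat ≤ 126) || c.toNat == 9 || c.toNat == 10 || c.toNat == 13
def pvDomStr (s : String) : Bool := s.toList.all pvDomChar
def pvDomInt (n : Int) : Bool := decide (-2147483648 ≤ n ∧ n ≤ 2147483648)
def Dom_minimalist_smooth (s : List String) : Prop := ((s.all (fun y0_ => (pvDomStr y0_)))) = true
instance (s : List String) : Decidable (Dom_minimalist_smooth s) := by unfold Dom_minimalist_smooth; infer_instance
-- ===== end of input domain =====

-- B recomputes each of the 9 output cells independently from a per-cell list of contributing
-- edge neighbors (max qualifying digit, else center), instead of A's in-place mutation loop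
-- over the digits 1..4; objective: alternative decomposition, similar cost.


-- ===== PORT A =====
-- one iteration of A's loop body (the four `if s[k] == t: if int(t) > int(pixcolour): …` blocks)
def pvStepA (s : List String) (pixcolour : String) (nt : List String) (x : Int) : List String :=
  let t := PySem.Int.toStr (x + 1)
  let nt := if (PySem.List.pyGet? s 1).getD "" = t then
      (if (PySem.Int.ofStr? t).getD 0 > (PySem.Int.ofStr? pixcolour).getD 0 then
        ((nt.set 0 t).set 1 t).set 2 t else nt) else nt
  let nt := if (PySem.List.pyGet? s 3).getD "" = t then
      (if (PySem.Int.ofStr? t).getD 0 > (PySem.Int.ofStr? pixcolour).getD 0 then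
        ((nt.set 0 t).set 3 t).set 6 t else nt) else nt
  let nt := if (PySem.List.pyGet? s 7).getD "" = t then
      (if (PySem.Int.ofStr? t).getD 0 > (PySem.Int.ofStr? pixcolour).getD 0 then
        ((nt.set 6 t).set 7 t).set 8 t else nt) else nt
  let nt := if (PySem.List.pyGet? s 5).getD "" = t then
      (if (PySem.Int.ofStr? t).getD 0 > (PySem.Int.ofStr? pixcolour).getD 0 then
        ((nt.set 2 t).set 5 t).set 8 t else nt) else nt
  nt

def minimalist_smooth (s : List String) : String :=
  let newtile := (PySem.List.pyRange 0 9 1).foldl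
    (fun acc _ => acc ++ [(PySem.List.pyGet? s 4).getD ""]) []
  let pixcolour := (PySem.List.pyGet? s 4).getD ""
  let newtile := (PySem.List.pyRange 0 4 1).foldl (pvStepA s pixcolour) newtile
  (PySem.List.pyRange 0 9 1).foldl
    (fun data x => data ++ PySem.List.pyGetD newtile x "") ""

-- ===== PORT B =====
-- `n in ('1','2','3','4') and int(n) > int(center)`
def pvQual (center n : String) : Bool :=
  (n == "1" || n == "2" || n == "3" || n == "4") &&
    decide ((PySem.Int.ofStr? n).getD 0 > (PySem.Int.ofStr? center).getD 0)

def minimalist_smooth_alt (s : List String) : String :=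
  let center := (PySem.List.pyGet? s 4).getD ""
  let top := (PySem.List.pyGet? s 1).getD ""
  let left := (PySem.List.pyGet? s 3).getD ""
  let right := (PySem.List.pyGet? s 5).getD ""
  let bottom := (PySem.List.pyGet? s 7).getD ""
  let cells : List (List String) :=
    [[top, left], [top], [top, right], [left], [], [right],
     [left, bottom], [bottom], [bottom, right]]
  let out := cells.map (fun nbrs =>
    let winners := ((nbrs.filter (fun n => pvQual center n)).map
      (fun n => (PySem.Int.ofStr? n).getD 0))
    match PySem.List.max? winners (fun y => y) with
    | some m => PySem.Int.toStr m
    | none => center)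
  PySem.Str.join "" out

-- ===== PRECONDITION & SPEC =====
-- Pre_ excludes exactly the inputs on which the Python A raises: lists shorter than 8
-- (IndexError) and inputs where some edge neighbor (s[1], s[3], s[5], s[7]) is one of
-- '1'..'4' but int(s[4]) fails (ValueError).
def Pre_minimalist_smooth (s : List String) : Prop :=
  8 ≤ s.length ∧
  ((s.getD 1 "" ∈ ["1","2","3","4"] ∨ s.getD 3 "" ∈ ["1","2","3","4"] ∨
    s.getD 5 "" ∈ ["1","2","3","4"] ∨ s.getD 7 "" ∈ ["1","2","3","4"]) →
    (PySem.Int.ofStr? (s.getD 4 "")).isSome = true)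
instance (s : List String) : Decidable (Pre_minimalist_smooth s) := by
  unfold Pre_minimalist_smooth; infer_instance

def pvWitness_minimalist_smooth : List String :=
  ["0", "1", "0", "2", "1", "0", "0", "3"]

def Spec_minimalist_smooth (s : List String) (out : String) : Prop := out = minimalist_smooth_alt s
instance (s : List String) (out : String) : Decidable (Spec_minimalist_smooth s out) := by unfold Spec_minimalist_smooth; infer_instance

-- ===== CLAIM (what is proved, stated in full; the proofs are below) =====
def Claim_equal_minimalist_smooth : Prop := ∀ (s : List String), Dom_minimalist_smooth s → Pre_minimalist_smooth s → Spec_minimalist_smooth s (minimalist_smooth s)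

-- ===== LEMMAS AND PROOFS =====

-- digit value of a neighbor string: some v iff it is the literal "1".."4"
def pvDv (n : String) : Option Int :=
  if n = "1" then some 1 else if n = "2" then some 2 else
  if n = "3" then some 3 else if n = "4" then some 4 else none

-- tile cells as tokens: `none` = untouched center, `some v` = written digit v
def pvRender (center : String) (o : Option Int) : String :=
  match o with
  | some v => PySem.Int.toStr v
  | none => center

-- finite encoding of a digit value (0 = not a digit)
def pvEnc (e : Fin 5) : Option Int := if e.val = 0 then none else some (e.val : Int)

-- token mirror of pvStepA; rc : Fin 5 abstracts int(center) (the region of c among 1..4)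
def pvStepTok (d1 d3 d7 d5 : Option Int) (rc : Fin 5) (nt : List (Option Int)) (t : Int) :
    List (Option Int) :=
  let nt := if d1 = some t ∧ (rc.val : Int) < t then ((nt.set 0 (some t)).set 1 (some t)).set 2 (some t) else nt
  let nt := if d3 = some t ∧ (rc.val : Int) < t then ((nt.set 0 (some t)).set 3 (some t)).set 6 (some t) else nt
  let nt := if d7 = some t ∧ (rc.val : Int) < t then ((nt.set 6 (some t)).set 7 (some t)).set 8 (some t) else nt
  let nt := if d5 = some t ∧ (rc.val : Int) < t then ((nt.set 2 (some t)).set 5 (some t)).set 8 (some t) else nt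
  nt

-- token mirror of B's per-cell computation
def pvCellTok (rc : Fin 5) (ds : List (Option Int)) : Option Int :=
  PySem.List.max? (ds.filterMap (fun d => d.bind (fun v => if (rc.val : Int) < v then some v else none)))
    (fun y => y)

-- the combinatorial core: A's write loop and B's per-cell maxima agree, on tokens (finite, decided)
theorem pv_core : ∀ (e1 e3 e5 e7 rc : Fin 5),
    ([1,2,3,4] : List Int).foldl (pvStepTok (pvEnc e1) (pvEnc e3) (pvEnc e7) (pvEnc e5) rc)
        [none,none,none,none,none,none,none,none,none]
      = [[pvEnc e1, pvEnc e3],[pvEnc e1],[pvEnc e1, pvEnc e5],[pvEnc e3],[],[pvEnc e5],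
         [pvEnc e3, pvEnc e7],[pvEnc e7],[pvEnc e7, pvEnc e5]].map (pvCellTok rc) := by decide

lemma pvDv_eq_one (n : String) : (n = "1") = (pvDv n = some 1) := by
  unfold pvDv; split_ifs <;> simp_all
lemma pvDv_eq_two (n : String) : (n = "2") = (pvDv n = some 2) := by
  unfold pvDv; split_ifs <;> simp_all
lemma pvDv_eq_three (n : String) : (n = "3") = (pvDv n = some 3) := by
  unfold pvDv; split_ifs <;> simp_all
lemma pvDv_eq_four (n : String) : (n = "4") = (pvDv n = some 4) := by
  unfold pvDv; split_ifs <;> simp_all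

lemma pvDv_enc (n : String) : ∃ e : Fin 5, pvDv n = pvEnc e := by
  unfold pvDv
  split_ifs
  exacts [⟨1, by decide⟩, ⟨2, by decide⟩, ⟨3, by decide⟩, ⟨4, by decide⟩, ⟨0, by decide⟩]

-- B's winners list, rewritten on digit values
lemma pv_winners_lift (center : String) (nbrs : List String) :
    (nbrs.filter (fun n => pvQual center n)).map (fun n => (PySem.Int.ofStr? n).getD 0)
      = (nbrs.map pvDv).filterMap
          (fun d => d.bind (fun v => if v > (PySem.Int.ofStr? center).getD 0 then some v else none)) := by
  induction nbrs with
  | nil => rfl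
  | cons n rest ih =>
    simp only [List.filter_cons, List.map_cons, List.filterMap_cons]
    by_cases h1 : n = "1"
    · subst h1
      simp [pvQual, ih, show PySem.Int.ofStr? "1" = some 1 from by decide, pvDv]
      split_ifs <;> simp_all [pvQual, pvDv, show PySem.Int.ofStr? "1" = some 1 from by decide,
        show PySem.Int.ofStr? "2" = some 2 from by decide,
        show PySem.Int.ofStr? "3" = some 3 from by decide,
        show PySem.Int.ofStr? "4" = some 4 from by decide]
    by_cases h2 : n = "2"
    · subst h2
      simp [pvQual, ih, show PySem.Int.ofStr? "2" = some 2 from by decide, pvDv]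
      split_ifs <;> simp_all [pvQual, pvDv, show PySem.Int.ofStr? "1" = some 1 from by decide,
        show PySem.Int.ofStr? "2" = some 2 from by decide,
        show PySem.Int.ofStr? "3" = some 3 from by decide,
        show PySem.Int.ofStr? "4" = some 4 from by decide]
    by_cases h3 : n = "3"
    · subst h3
      simp [pvQual, ih, show PySem.Int.ofStr? "3" = some 3 from by decide, pvDv]
      split_ifs <;> simp_all [pvQual, pvDv, show PySem.Int.ofStr? "1" = some 1 from by decide,
        show PySem.Int.ofStr? "2" = some 2 from by decide,
        show PySem.Int.ofStr? "3" = some 3 from by decide,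
        show PySem.Int.ofStr? "4" = some 4 from by decide]
    by_cases h4 : n = "4"
    · subst h4
      simp [pvQual, ih, show PySem.Int.ofStr? "4" = some 4 from by decide, pvDv]
      split_ifs <;> simp_all [pvQual, pvDv, show PySem.Int.ofStr? "1" = some 1 from by decide,
        show PySem.Int.ofStr? "2" = some 2 from by decide,
        show PySem.Int.ofStr? "3" = some 3 from by decide,
        show PySem.Int.ofStr? "4" = some 4 from by decide]
    · have hd : pvDv n = none := by unfold pvDv; split_ifs <;> simp_all
      have hq : pvQual center n = false := by simp [pvQual, h1, h2, h3, h4]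
      simp [hq, hd, ih]

-- B's per-cell value on strings is the rendered token cell
lemma pv_cell_lift (a4 : String) (rc : Fin 5)
    (hiff : ∀ v : Int, 1 ≤ v → v ≤ 4 → ((v > (PySem.Int.ofStr? a4).getD 0) ↔ (rc.val : Int) < v))
    (nbrs : List String) :
    (match PySem.List.max?
        ((nbrs.filter (fun n => pvQual a4 n)).map (fun n => (PySem.Int.ofStr? n).getD 0))
        (fun y => y) with
     | some m => PySem.Int.toStr m
     | none => a4)
      = pvRender a4 (pvCellTok rc (nbrs.map pvDv)) := by
  rw [pv_winners_lift]
  have hfm : (nbrs.map pvDv).filterMap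
        (fun d => d.bind (fun v => if v > (PySem.Int.ofStr? a4).getD 0 then some v else none))
      = (nbrs.map pvDv).filterMap
        (fun d => d.bind (fun v => if (rc.val : Int) < v then some v else none)) := by
    induction nbrs with
    | nil => rfl
    | cons n rest ih =>
      simp only [List.map_cons, List.filterMap_cons]
      rw [ih]
      have hr : pvDv n = none ∨ pvDv n = some 1 ∨ pvDv n = some 2 ∨ pvDv n = some 3 ∨
          pvDv n = some 4 := by unfold pvDv; split_ifs <;> simp
      rcases hr with h|h|h|h|h <;> rw [h] <;>
        simp only [Option.bind_some, Option.bind_none,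
          propext (hiff 1 (by norm_num) (by norm_num)),
          propext (hiff 2 (by norm_num) (by norm_num)),
          propext (hiff 3 (by norm_num) (by norm_num)),
          propext (hiff 4 (by norm_num) (by norm_num))]
  rw [hfm]
  unfold pvCellTok pvRender
  cases PySem.List.max?
      ((nbrs.map pvDv).filterMap (fun d => d.bind (fun v => if (rc.val : Int) < v then some v else none)))
      (fun y => y) <;> rfl

lemma pv_ite_nest {α : Type} (p q : Prop) [Decidable p] [Decidable q] (a b : α) :
    (if p then (if q then a else b) else b) = if p ∧ q then a else b := by
  split_ifs <;> tauto

-- one loop iteration of A is the rendered token step (x ∈ range(4))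
lemma pv_step_lift (a0 a1 a2 a3 a4 a5 a6 a7 : String) (rest : List String) (rc : Fin 5)
    (hiff : ∀ v : Int, 1 ≤ v → v ≤ 4 → ((v > (PySem.Int.ofStr? a4).getD 0) ↔ (rc.val : Int) < v))
    (lt : List (Option Int)) (x : Int) (hx : x = 0 ∨ x = 1 ∨ x = 2 ∨ x = 3) :
    pvStepA (a0::a1::a2::a3::a4::a5::a6::a7::rest) a4 (lt.map (pvRender a4)) x
      = (pvStepTok (pvDv a1) (pvDv a3) (pvDv a7) (pvDv a5) rc lt (x + 1)).map (pvRender a4) := by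
  have e1 : PySem.List.pyGet? (a0::a1::a2::a3::a4::a5::a6::a7::rest) 1 = some a1 := by
    rw [show (1:Int) = ((1:Nat):Int) from rfl, PySem.List.pyGet?_natCast]; rfl
  have e3 : PySem.List.pyGet? (a0::a1::a2::a3::a4::a5::a6::a7::rest) 3 = some a3 := by
    rw [show (3:Int) = ((3:Nat):Int) from rfl, PySem.List.pyGet?_natCast]; rfl
  have e5 : PySem.List.pyGet? (a0::a1::a2::a3::a4::a5::a6::a7::rest) 5 = some a5 := by
    rw [show (5:Int) = ((5:Nat):Int) from rfl, PySem.List.pyGet?_natCast]; rfl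
  have e7 : PySem.List.pyGet? (a0::a1::a2::a3::a4::a5::a6::a7::rest) 7 = some a7 := by
    rw [show (7:Int) = ((7:Nat):Int) from rfl, PySem.List.pyGet?_natCast]; rfl
  rcases hx with rfl|rfl|rfl|rfl <;>
    simp only [pvStepA, pvStepTok, e1, e3, e5, e7, Option.getD_some,
      show (0:Int)+1 = 1 from by norm_num, show (1:Int)+1 = 2 from by norm_num,
      show (2:Int)+1 = 3 from by norm_num, show (3:Int)+1 = 4 from by norm_num,
      show PySem.Int.toStr 1 = "1" from by decide,
      show PySem.Int.toStr 2 = "2" from by decide,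
      show PySem.Int.toStr 3 = "3" from by decide,
      show PySem.Int.toStr 4 = "4" from by decide,
      show PySem.Int.ofStr? "1" = some 1 from by decide,
      show PySem.Int.ofStr? "2" = some 2 from by decide,
      show PySem.Int.ofStr? "3" = some 3 from by decide,
      show PySem.Int.ofStr? "4" = some 4 from by decide,
      pvDv_eq_one, pvDv_eq_two, pvDv_eq_three, pvDv_eq_four, pv_ite_nest] <;>
    simp only [propext (hiff 1 (by norm_num) (by norm_num)),
      propext (hiff 2 (by norm_num) (by norm_num)),
      propext (hiff 3 (by norm_num) (by norm_num)),
      propext (hiff 4 (by norm_num) (by norm_num)),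
      apply_ite (List.map (pvRender a4)), List.map_set, pvRender,
      show PySem.Int.toStr 1 = "1" from by decide,
      show PySem.Int.toStr 2 = "2" from by decide,
      show PySem.Int.toStr 3 = "3" from by decide,
      show PySem.Int.toStr 4 = "4" from by decide]

-- the final `data += newtile[x]` loop over a 9-element tile is ''.join
lemma pv_build9 (y0 y1 y2 y3 y4 y5 y6 y7 y8 : String) :
    (PySem.List.pyRange 0 9 1).foldl
        (fun data x => data ++ PySem.List.pyGetD [y0,y1,y2,y3,y4,y5,y6,y7,y8] x "") ""
      = PySem.Str.join "" [y0,y1,y2,y3,y4,y5,y6,y7,y8] := by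
  simp [show PySem.List.pyRange 0 9 1 = [0,1,2,3,4,5,6,7,8] from by decide,
    List.foldl, PySem.List.pyGetD, PySem.List.pyGet?, PySem.List.pyIdx?,
    PySem.Str.join, PySem.Chars.join, List.intercalate, String.ext_iff]

-- the `for x in range(9): newtile.append(s[4])` loop
lemma pv_rep9 (z : String) :
    (PySem.List.pyRange 0 9 1).foldl (fun acc _ => acc ++ [z]) ([] : List String)
      = [z,z,z,z,z,z,z,z,z] := by
  simp [show PySem.List.pyRange 0 9 1 = [0,1,2,3,4,5,6,7,8] from by decide, List.foldl]

-- A = B on a destructured input, for any region abstraction rc of int(center)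
lemma pv_key_rc (a0 a1 a2 a3 a4 a5 a6 a7 : String) (rest : List String) (rc : Fin 5)
    (hiff : ∀ v : Int, 1 ≤ v → v ≤ 4 → ((v > (PySem.Int.ofStr? a4).getD 0) ↔ (rc.val : Int) < v)) :
    minimalist_smooth (a0::a1::a2::a3::a4::a5::a6::a7::rest)
      = minimalist_smooth_alt (a0::a1::a2::a3::a4::a5::a6::a7::rest) := by
  have e1 : PySem.List.pyGet? (a0::a1::a2::a3::a4::a5::a6::a7::rest) 1 = some a1 := by
    rw [show (1:Int) = ((1:Nat):Int) from rfl, PySem.List.pyGet?_natCast]; rfl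
  have e3 : PySem.List.pyGet? (a0::a1::a2::a3::a4::a5::a6::a7::rest) 3 = some a3 := by
    rw [show (3:Int) = ((3:Nat):Int) from rfl, PySem.List.pyGet?_natCast]; rfl
  have e4 : PySem.List.pyGet? (a0::a1::a2::a3::a4::a5::a6::a7::rest) 4 = some a4 := by
    rw [show (4:Int) = ((4:Nat):Int) from rfl, PySem.List.pyGet?_natCast]; rfl
  have e5 : PySem.List.pyGet? (a0::a1::a2::a3::a4::a5::a6::a7::rest) 5 = some a5 := by
    rw [show (5:Int) = ((5:Nat):Int) from rfl, PySem.List.pyGet?_natCast]; rfl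
  have e7 : PySem.List.pyGet? (a0::a1::a2::a3::a4::a5::a6::a7::rest) 7 = some a7 := by
    rw [show (7:Int) = ((7:Nat):Int) from rfl, PySem.List.pyGet?_natCast]; rfl
  obtain ⟨f1, hf1⟩ := pvDv_enc a1
  obtain ⟨f3, hf3⟩ := pvDv_enc a3
  obtain ⟨f5, hf5⟩ := pvDv_enc a5
  obtain ⟨f7, hf7⟩ := pvDv_enc a7
  have hstep := pv_step_lift a0 a1 a2 a3 a4 a5 a6 a7 rest rc hiff
  have hcore := pv_core f1 f3 f5 f7 rc
  simp only [List.foldl] at hcore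
  unfold minimalist_smooth minimalist_smooth_alt
  simp only [e1, e3, e4, e5, e7, Option.getD_some, pv_rep9,
    show PySem.List.pyRange 0 4 1 = [0,1,2,3] from by decide, List.foldl]
  rw [show ([a4,a4,a4,a4,a4,a4,a4,a4,a4] : List String)
        = ([none,none,none,none,none,none,none,none,none] : List (Option Int)).map (pvRender a4)
      from rfl,
    hstep _ 0 (by norm_num), hstep _ 1 (by norm_num), hstep _ 2 (by norm_num),
    hstep _ 3 (by norm_num),
    show (0:Int)+1 = 1 from by norm_num, show (1:Int)+1 = 2 from by norm_num,
    show (2:Int)+1 = 3 from by norm_num, show (3:Int)+1 = 4 from by norm_num,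
    hf1, hf3, hf5, hf7, hcore]
  simp only [List.map_cons, List.map_nil,
    pv_cell_lift a4 rc hiff,
    show ([a1, a3].map pvDv) = [pvDv a1, pvDv a3] from rfl,
    show ([a1].map pvDv) = [pvDv a1] from rfl]
  rw [pv_build9]
  simp only [hf1, hf3, hf5, hf7, pvRender]

-- ===== VERDICT (by name: the statement is the Claim_ definition above) =====
theorem minimalist_smooth_spec : Claim_equal_minimalist_smooth := by
  intro s _ hpre
  obtain ⟨hlen, -⟩ := hpre
  rcases s with _|⟨a0,s⟩
  · simp only [List.length_nil] at hlen; omega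
  rcases s with _|⟨a1,s⟩
  · simp only [List.length_cons, List.length_nil] at hlen; omega
  rcases s with _|⟨a2,s⟩
  · simp only [List.length_cons, List.length_nil] at hlen; omega
  rcases s with _|⟨a3,s⟩
  · simp only [List.length_cons, List.length_nil] at hlen; omega
  rcases s with _|⟨a4,s⟩
  · simp only [List.length_cons, List.length_nil] at hlen; omega
  rcases s with _|⟨a5,s⟩
  · simp only [List.length_cons, List.length_nil] at hlen; omega
  rcases s with _|⟨a6,s⟩
  · simp only [List.length_cons, List.length_nil] at hlen; omega
  rcases s with _|⟨a7,rest⟩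
  · simp only [List.length_cons, List.length_nil] at hlen; omega
  have hreg : (PySem.Int.ofStr? a4).getD 0 ≤ 0 ∨ (PySem.Int.ofStr? a4).getD 0 = 1 ∨
      (PySem.Int.ofStr? a4).getD 0 = 2 ∨ (PySem.Int.ofStr? a4).getD 0 = 3 ∨
      4 ≤ (PySem.Int.ofStr? a4).getD 0 := by omega
  show minimalist_smooth _ = minimalist_smooth_alt _
  rcases hreg with hr|hr|hr|hr|hr
  · exact pv_key_rc a0 a1 a2 a3 a4 a5 a6 a7 rest 0
      (fun v h1 h4 => by constructor <;> intro <;> [simpa using h1; omega])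
  · exact pv_key_rc a0 a1 a2 a3 a4 a5 a6 a7 rest 1
      (fun v h1 h4 => by constructor <;> intro <;> omega)
  · exact pv_key_rc a0 a1 a2 a3 a4 a5 a6 a7 rest 2
      (fun v h1 h4 => by constructor <;> intro <;> omega)
  · exact pv_key_rc a0 a1 a2 a3 a4 a5 a6 a7 rest 3
      (fun v h1 h4 => by constructor <;> intro <;> omega)
  · exact pv_key_rc a0 a1 a2 a3 a4 a5 a6 a7 rest 4
      (fun v h1 h4 => by constructor <;> intro <;> omega)
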